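-- pv_equiv track=rewrite | github.com/netdata/netdata | src/ai-skills/tests/framework/normalize.py | parse_alert_config
-- ===== SOURCE A (Python) =====
-- from typing import Dict, Any, List, Optional
--
-- def normalize_whitespace(text: str) -> str:
--     """Normalize whitespace in text."""
--     if not text:
--         return ""
--     return " ".join(text.split())
--
-- def parse_alert_config(config_text: str) -> Dict[str, Any]:
--     """
--     Parse a Netdata alert configuration block into a dictionary.
--
--     Args:
--         config_text: Raw alert configuration text
--
--     Returns:
--         Dictionary with normalized alert fields
--     """
--     result = {}
--     current_key = None
--     current_value = []
--
--     for line in config_text.strip().split('\n'):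
--         line = line.strip()
--
--         # Skip empty lines and comments
--         if not line or line.startswith('#'):
--             continue
--
--         # Check if this is a key: value line
--         if ':' in line and not line.startswith(' '):
--             # Save previous key-value if exists
--             if current_key:
--                 result[current_key] = normalize_whitespace(' '.join(current_value))
--
--             # Parse new key-value
--             key, _, value = line.partition(':')
--             current_key = key.strip().lower().replace(' ', '_')
--             current_value = [value.strip()] if value.strip() else []
--         else:
--             # Continuation of previous value
--             if current_key:
--                 current_value.append(line)
--
--     # Don't forget the last key-value
--     if current_key:
--         result[current_key] = normalize_whitespace(' '.join(current_value))
--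
--     return result
-- ===== SOURCE B (Python) =====
-- def normalize_whitespace(text: str) -> str:
--     """Normalize whitespace in text."""
--     if not text:
--         return ""
--     return " ".join(text.split())
--
--
-- def _meaningful_lines(config_text):
--     """Strip all lines up front and drop empty/comment lines."""
--     return [l for l in (raw.strip() for raw in config_text.strip().split('\n'))
--             if l and not l.startswith('#')]
--
--
-- def _blocks(lines):
--     """Group the meaningful lines into (header, continuation lines) blocks by
--     consuming a stack: pop a line; if it is a header (contains ':'), an inner
--     scan pops its whole run of continuation lines; continuation lines found
--     before any header are simply discarded. No flush/accumulator state."""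
--     blocks = []
--     stack = lines[::-1]
--     while stack:
--         head = stack.pop()
--         if ':' not in head:
--             continue
--         cont = []
--         while stack and ':' not in stack[-1]:
--             cont.append(stack.pop())
--         blocks.append((head, cont))
--     return blocks
--
--
-- def parse_alert_config(config_text: str):
--     result = {}
--     for header, cont in _blocks(_meaningful_lines(config_text)):
--         key, _, value = header.partition(':')
--         key = key.strip().lower().replace(' ', '_')
--         if key:
--             value = value.strip()
--             result[key] = normalize_whitespace(' '.join(([value] if value else []) + cont))
--     return result
-- ===== Notes on version B (the rewrite author's own statement) =====
-- stated objective: alternative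
-- what changed: Replaced A's single stateful pass (current_key/current_value with flush-on-next-header and a trailing flush) by: a filtering pass producing the meaningful stripped lines, a stack-consuming grouper whose inner scan pops each header's run of continuation lines (no accumulator/flush state, leading continuations discarded structurally), and a fold over the blocks emitting the dict.
import Mathlib
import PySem

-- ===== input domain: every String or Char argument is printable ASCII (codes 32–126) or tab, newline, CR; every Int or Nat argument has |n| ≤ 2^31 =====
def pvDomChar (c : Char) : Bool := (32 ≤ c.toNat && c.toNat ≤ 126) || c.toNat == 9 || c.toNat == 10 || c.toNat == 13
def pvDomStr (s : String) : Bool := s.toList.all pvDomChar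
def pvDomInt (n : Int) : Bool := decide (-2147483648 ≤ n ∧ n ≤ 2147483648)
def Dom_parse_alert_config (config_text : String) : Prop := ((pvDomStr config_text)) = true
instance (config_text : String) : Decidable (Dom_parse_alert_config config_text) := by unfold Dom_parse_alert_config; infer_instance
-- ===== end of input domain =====

-- B parses in three independent stages (filter the meaningful lines, group them into
-- header+continuation blocks by a stack-consuming scan, fold the blocks into the dict)
-- instead of A's single stateful pass; same return value, no speed claim.

-- shared helper expressions of both Pythons

-- line.partition(':') restricted to the used components (before, after); exact for the
-- single-character separator ':' : before = chars before the first ':', after = chars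
-- after it ('' when ':' is absent, as in Python).
def pvPartitionColon (line : String) : String × String :=
  (String.ofList (line.toList.takeWhile (fun c => c ≠ ':')),
   String.ofList ((line.toList.dropWhile (fun c => c ≠ ':')).tail))

-- key.strip().lower().replace(' ', '_')
def pvNormKey (k : String) : String :=
  PySem.Str.replace (PySem.Str.lower (PySem.Str.strip k)) " " "_"

-- normalize_whitespace
def pvNormWS (text : String) : String :=
  if text = "" then "" else PySem.Str.join " " (PySem.Str.split₀ text)

-- ===== PORT A =====

-- Python truthiness of current_key : Optional[str]
def pvA_truthy (ck : Option String) : Bool :=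
  match ck with
  | none => false
  | some k => decide (k ≠ "")

-- 'if current_key: result[current_key] = normalize_whitespace(' '.join(current_value))'
def pvA_flush (res : PySem.Dict String String) (ck : Option String) (cv : List String) :
    PySem.Dict String String :=
  if pvA_truthy ck then res.insert (ck.getD "") (pvNormWS (PySem.Str.join " " cv)) else res

def pvA_loop : List String → PySem.Dict String String → Option String → List String →
    PySem.Dict String String
  | [], res, ck, cv => pvA_flush res ck cv
  | l :: ls, res, ck, cv =>
    let line := PySem.Str.strip l
    if (line == "") || PySem.Str.startswith line "#" then
      pvA_loop ls res ck cv
    else if PySem.Str.isIn ":" line && !PySem.Str.startswith line " " then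
      let res' := pvA_flush res ck cv
      let kv := pvPartitionColon line
      let v := PySem.Str.strip kv.2
      pvA_loop ls res' (some (pvNormKey kv.1)) (if v ≠ "" then [v] else [])
    else
      pvA_loop ls res ck (if pvA_truthy ck then cv ++ [line] else cv)

def parse_alert_config (config_text : String) : List (String × String) :=
  -- split('\n') with a nonempty separator: split? is always `some` here
  (pvA_loop ((PySem.Str.split? (PySem.Str.strip config_text) "\n").getD [])
    PySem.Dict.empty none []).items

-- ===== PORT B =====

-- stage 1: _meaningful_lines — strip every line, drop empty and '#'-comment lines
def pvB_lines (config_text : String) : List String :=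
  (((PySem.Str.split? (PySem.Str.strip config_text) "\n").getD []).map PySem.Str.strip).filter
    (fun l => !((l == "") || PySem.Str.startswith l "#"))

-- stage 2: _blocks — Python consumes lines[::-1] as a stack popping from the END, i.e. the
-- original lines front-to-back; here the stack is the list consumed from the HEAD (same
-- pops, same order). The inner 'while stack and ':' not in stack[-1]: cont.append(pop)'
-- is exactly takeWhile / dropWhile of the no-colon predicate.
def pvB_blocks : List String → List (String × List String)
  | [] => []
  | head :: stack =>
    if PySem.Str.isIn ":" head then
      (head, stack.takeWhile (fun x => !PySem.Str.isIn ":" x)) ::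
        pvB_blocks (stack.dropWhile (fun x => !PySem.Str.isIn ":" x))
    else pvB_blocks stack
  termination_by ls => ls.length
  decreasing_by
    · exact Nat.lt_succ_of_le (List.length_dropWhile_le _ _)
    · simp

-- stage 3: the fold emitting the dict (later duplicate keys overwrite earlier ones)
def parse_alert_config_alt (config_text : String) : List (String × String) :=
  ((pvB_blocks (pvB_lines config_text)).foldl
    (fun res b =>
      let kv := pvPartitionColon b.1
      let key := pvNormKey kv.1
      if key ≠ "" then
        let v := PySem.Str.strip kv.2
        res.insert key (pvNormWS (PySem.Str.join " " ((if v ≠ "" then [v] else []) ++ b.2)))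
      else res)
    PySem.Dict.empty).items

-- ===== PRECONDITION & SPEC =====
def Spec_parse_alert_config (config_text : String) (out : List (String × String)) : Prop := out = parse_alert_config_alt config_text
instance (config_text : String) (out : List (String × String)) : Decidable (Spec_parse_alert_config config_text out) := by unfold Spec_parse_alert_config; infer_instance

-- ===== CLAIM (what is proved, stated in full; the proofs are below) =====
def Claim_equal_parse_alert_config : Prop := ∀ (config_text : String), Dom_parse_alert_config config_text → Spec_parse_alert_config config_text (parse_alert_config config_text)

-- ===== LEMMAS AND PROOFS =====

-- proof-side view of A's grouping: the closed blocks already emitted plus the open block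
def pvG : List String → Option (String × List String) → List (String × List String)
  | [], cur => cur.toList
  | l :: ls, cur =>
    let line := PySem.Str.strip l
    if (line == "") || PySem.Str.startswith line "#" then
      pvG ls cur
    else if PySem.Str.isIn ":" line then
      let kv := pvPartitionColon line
      let v := PySem.Str.strip kv.2
      cur.toList ++ pvG ls (some (pvNormKey kv.1, if v ≠ "" then [v] else []))
    else
      pvG ls (cur.map (fun b => (b.1, b.2 ++ [line])))

-- pvG on already-stripped, already-filtered lines
def pvG2 : List String → Option (String × List String) → List (String × List String)
  | [], cur => cur.toList
  | l :: ls, cur =>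
    if PySem.Str.isIn ":" l then
      let kv := pvPartitionColon l
      let v := PySem.Str.strip kv.2
      cur.toList ++ pvG2 ls (some (pvNormKey kv.1, if v ≠ "" then [v] else []))
    else
      pvG2 ls (cur.map (fun b => (b.1, b.2 ++ [l])))

def pvEmitF (res : PySem.Dict String String) (blocks : List (String × List String)) :
    PySem.Dict String String :=
  blocks.foldl
    (fun res b => if b.1 ≠ "" then res.insert b.1 (pvNormWS (PySem.Str.join " " b.2)) else res)
    res

-- (key, value parts) a block's header contributes
def pvHdr (h : String) (cont : List String) : String × List String :=
  (pvNormKey (pvPartitionColon h).1,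
   (if PySem.Str.strip (pvPartitionColon h).2 ≠ "" then [PySem.Str.strip (pvPartitionColon h).2]
    else []) ++ cont)

def pvCur (ck : Option String) (cv : List String) : Option (String × List String) :=
  match ck with
  | none => none
  | some k => some (k, cv)

-- head of a dropWhile is not accepted by the predicate
theorem pv_dropWhile_head (l : List Char) (c : Char) (t : List Char)
    (h : List.dropWhile PySem.Chars.isspace l = c :: t) : PySem.Chars.isspace c = false := by
  induction l with
  | nil => simp at h
  | cons a l ih =>
    rw [List.dropWhile_cons] at h
    split at h
    · exact ih h
    · cases h
      simpa using ‹¬ PySem.Chars.isspace c = true›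

-- a nonempty stripped line cannot start with a space
theorem pv_strip_no_space (s : String) (h : PySem.Str.strip s ≠ "") :
    PySem.Str.startswith (PySem.Str.strip s) " " = false := by
  rw [PySem.Str.startswith_eq, PySem.Str.toList_strip]
  have hnil : PySem.Chars.strip s.toList ≠ [] := by
    intro hn
    exact h (String.toList_inj.mp (by rw [PySem.Str.toList_strip, hn]; rfl))
  obtain ⟨c, t, hct⟩ : ∃ c t, PySem.Chars.strip s.toList = c :: t := by
    cases hcs : PySem.Chars.strip s.toList with
    | nil => exact absurd hcs hnil
    | cons c t => exact ⟨c, t, rfl⟩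
  have hpre : PySem.Chars.strip s.toList <+: PySem.Chars.lstrip s.toList := by
    unfold PySem.Chars.strip PySem.Chars.rstrip
    have := List.reverse_prefix.mpr
      (List.dropWhile_suffix (l := (PySem.Chars.lstrip s.toList).reverse) PySem.Chars.isspace)
    rwa [List.reverse_reverse] at this
  obtain ⟨r, hr⟩ := hpre
  rw [hct] at hr
  have hdrop : List.dropWhile PySem.Chars.isspace s.toList = c :: (t ++ r) := by
    have : PySem.Chars.lstrip s.toList = c :: (t ++ r) := by rw [← hr]; simp
    simpa [PySem.Chars.lstrip] using this
  have hcsp : PySem.Chars.isspace c = false := pv_dropWhile_head _ _ _ hdrop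
  have hcne : (' ' == c) = false := by
    cases hc : (' ' == c)
    · rfl
    · rw [show c = ' ' from (beq_iff_eq.mp hc).symm] at hcsp
      exact absurd hcsp (by decide)
  rw [hct]
  show PySem.Chars.startswith (c :: t) (" " : String).toList = false
  simp [PySem.Chars.startswith, List.isPrefixOf, hcne, show (" " : String).toList = [' '] by rfl]

theorem pvEmitF_append (res : PySem.Dict String String) (b1 b2 : List (String × List String)) :
    pvEmitF res (b1 ++ b2) = pvEmitF (pvEmitF res b1) b2 := by
  unfold pvEmitF; rw [List.foldl_append]

theorem pvA_flush_eq (res : PySem.Dict String String) (ck : Option String) (cv : List String) :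
    pvEmitF res (pvCur ck cv).toList = pvA_flush res ck cv := by
  cases ck <;> simp [pvEmitF, pvCur, pvA_flush, pvA_truthy]

-- the open block's parts are irrelevant once its key is empty
theorem pvG_empty_key (ls : List String) (ps ps' : List String) (res : PySem.Dict String String) :
    pvEmitF res (pvG ls (some ("", ps))) = pvEmitF res (pvG ls (some ("", ps')))  := by
  induction ls generalizing ps ps' res with
  | nil => simp [pvG, pvEmitF]
  | cons l ls ih =>
    simp only [pvG]
    by_cases h1 : ((PySem.Str.strip l == "") || PySem.Str.startswith (PySem.Str.strip l) "#") = true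
    · simp only [h1, if_true]
      exact ih ps ps' res
    · rw [Bool.not_eq_true] at h1
      by_cases h2 : PySem.Str.isIn ":" (PySem.Str.strip l) = true
      · simp only [h1, h2, Bool.false_eq_true, if_false, if_true, Option.toList_some]
        simp [pvEmitF]
      · rw [Bool.not_eq_true] at h2
        simp only [h1, h2, Bool.false_eq_true, if_false, Option.map_some]
        exact ih (ps ++ [PySem.Str.strip l]) (ps' ++ [PySem.Str.strip l]) res

theorem pvA_loop_eq (ls : List String) (res : PySem.Dict String String)
    (ck : Option String) (cv : List String) :
    pvA_loop ls res ck cv = pvEmitF res (pvG ls (pvCur ck cv)) := by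
  induction ls generalizing res ck cv with
  | nil =>
    simp only [pvA_loop, pvG]
    exact (pvA_flush_eq res ck cv).symm
  | cons l ls ih =>
    simp only [pvA_loop, pvG]
    by_cases h1 : ((PySem.Str.strip l == "") || PySem.Str.startswith (PySem.Str.strip l) "#") = true
    · simp only [h1, if_true]
      exact ih res ck cv
    · have hne : PySem.Str.strip l ≠ "" := by
        intro hn
        exact h1 (by simp [hn])
      have hsp := pv_strip_no_space l hne
      rw [Bool.not_eq_true] at h1
      by_cases h2 : PySem.Str.isIn ":" (PySem.Str.strip l) = true
      · simp only [h1, h2, hsp, Bool.false_eq_true, if_false, Bool.not_false, Bool.and_true,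
          if_true]
        rw [ih, pvEmitF_append, pvA_flush_eq]
        simp [pvCur]
      · rw [Bool.not_eq_true] at h2
        simp only [h1, h2, Bool.false_eq_true, if_false, Bool.false_and]
        cases ck with
        | none => simpa [pvA_truthy, pvCur] using ih res none cv
        | some k =>
          by_cases hk : k = ""
          · subst hk
            have ht : pvA_truthy (some "") = false := by simp [pvA_truthy]
            simp only [ht, Bool.false_eq_true, if_false]
            rw [ih res (some "") cv]
            simpa [pvCur] using pvG_empty_key ls cv (cv ++ [PySem.Str.strip l]) res
          · have ht : pvA_truthy (some k) = true := by simp [pvA_truthy, hk]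
            simp only [ht, if_true]
            simpa [pvCur] using ih res (some k) (cv ++ [PySem.Str.strip l])

-- pvG over the raw lines = pvG2 over the stripped-and-filtered (meaningful) lines
theorem pvG_eq_pvG2 (ls : List String) (cur : Option (String × List String)) :
    pvG ls cur =
      pvG2 ((ls.map PySem.Str.strip).filter
        (fun l => !((l == "") || PySem.Str.startswith l "#"))) cur := by
  induction ls generalizing cur with
  | nil => simp [pvG, pvG2]
  | cons l ls ih =>
    simp only [pvG, List.map_cons, List.filter_cons]
    by_cases h1 : ((PySem.Str.strip l == "") || PySem.Str.startswith (PySem.Str.strip l) "#") = true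
    · simp only [h1, if_true, Bool.not_true, Bool.false_eq_true, if_false]
      exact ih cur
    · rw [Bool.not_eq_true] at h1
      simp only [h1, Bool.not_false, if_true, Bool.false_eq_true, if_false, pvG2]
      by_cases h2 : PySem.Str.isIn ":" (PySem.Str.strip l) = true
      · simp only [h2, if_true]
        rw [ih]
      · rw [Bool.not_eq_true] at h2
        simp only [h2, Bool.false_eq_true, if_false]
        exact ih _

-- pvG2 with an open block = that block closed over the takeWhile run, then the rest
theorem pvG2_some (ls : List String) (k : String) (ps : List String) :
    pvG2 ls (some (k, ps)) =
      (k, ps ++ ls.takeWhile (fun x => !PySem.Str.isIn ":" x)) ::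
        (pvB_blocks (ls.dropWhile (fun x => !PySem.Str.isIn ":" x))).map
          (fun b => pvHdr b.1 b.2) := by
  induction ls generalizing k ps with
  | nil => simp [pvG2, pvB_blocks]
  | cons l ls ih =>
    by_cases h : PySem.Str.isIn ":" l = true
    · simp only [pvG2, h, if_true, Option.toList_some, List.takeWhile_cons, List.dropWhile_cons,
        Bool.not_true, Bool.false_eq_true, if_false, List.singleton_append, pvB_blocks,
        List.map_cons, List.append_nil]
      rw [ih]
      rfl
    · rw [Bool.not_eq_true] at h
      simp only [pvG2, h, Bool.false_eq_true, if_false, Option.map_some, List.takeWhile_cons,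
        List.dropWhile_cons, Bool.not_false, if_true]
      rw [ih]
      simp

-- starting with no open block: pvG2 = the mapped blocks of B's grouper
theorem pvG2_none (ms : List String) :
    pvG2 ms none = (pvB_blocks ms).map (fun b => pvHdr b.1 b.2) := by
  induction ms with
  | nil => simp [pvG2, pvB_blocks]
  | cons l ls ih =>
    by_cases h : PySem.Str.isIn ":" l = true
    · simp only [pvG2, h, if_true, Option.toList_none, List.nil_append, pvB_blocks, List.map_cons]
      rw [pvG2_some]
      rfl
    · rw [Bool.not_eq_true] at h
      simp only [pvG2, h, Bool.false_eq_true, if_false, Option.map_none, pvB_blocks]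
      exact ih

-- ===== VERDICT (by name: the statement is the Claim_ definition above) =====
theorem parse_alert_config_spec : Claim_equal_parse_alert_config := by
  intro config_text _
  unfold Spec_parse_alert_config parse_alert_config parse_alert_config_alt
  rw [pvA_loop_eq]
  show (pvEmitF PySem.Dict.empty (pvG _ none)).items = _
  rw [pvG_eq_pvG2, pvG2_none]
  unfold pvEmitF pvB_lines
  rw [List.foldl_map]
  congr 1
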